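-- pv_equiv track=rewrite | github.com/jiangzf93/od-solution-python | C_1_mountain/solution.py | solve
-- ===== SOURCE A (Python) =====
-- def solve(heights):
--     if len(heights) <= 1:
--         return 0
--     else:
--         result = 0
--         lenH = len(heights)
--         if heights[0] > heights[1]:
--             result += 1
--         if heights[lenH-1] > heights[lenH-2]:
--             result += 1
--         for i in range(1, len(heights)-1):
--             if heights[i] > heights[i-1] and heights[i] > heights[i+1]:
--                 result += 1
--         return result
-- ===== SOURCE B (Python) =====
-- def solve(heights):
--     if len(heights) <= 1:
--         return 0
--     # State machine over the stream of elements: carry the element just seen and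
--     # whether we arrived at it on a strict rise; a peak is a rise followed by a fall.
--     count = 0
--     it = iter(heights)
--     prev = next(it)
--     rising = True  # virtual rise onto the first element (it has no left neighbor)
--     for x in it:
--         if rising and x < prev:
--             count += 1
--         rising = x > prev
--         prev = x
--     return count + 1 if rising else count
-- ===== Notes on version B (the rewrite author's own statement) =====
-- stated objective: alternative
-- what changed: Replaces A's random-access neighbor comparisons (two endpoint special cases plus an indexed interior loop reading heights[i-1], heights[i], heights[i+1]) by a streaming state machine that carries only the previous element and a 'rising' flag, counting each rise-then-fall transition; endpoints fall out of the initial flag and the final flag check.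
import Mathlib
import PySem

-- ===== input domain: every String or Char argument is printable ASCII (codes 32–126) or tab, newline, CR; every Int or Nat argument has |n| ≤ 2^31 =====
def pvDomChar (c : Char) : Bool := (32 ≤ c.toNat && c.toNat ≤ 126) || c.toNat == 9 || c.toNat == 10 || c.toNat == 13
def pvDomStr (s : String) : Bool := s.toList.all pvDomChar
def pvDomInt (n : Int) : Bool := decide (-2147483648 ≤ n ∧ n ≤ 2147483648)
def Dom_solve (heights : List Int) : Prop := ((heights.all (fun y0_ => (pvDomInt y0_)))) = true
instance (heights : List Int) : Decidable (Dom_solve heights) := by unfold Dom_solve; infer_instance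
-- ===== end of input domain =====

-- B replaces A's indexed neighbor lookups and endpoint special cases by a streaming
-- state machine (previous element + 'rising' flag) counting rise-then-fall transitions
-- (objective: alternative; same O(n) cost).

-- ===== PORT A =====
def solve (heights : List Int) : Int :=
  if heights.length ≤ 1 then 0
  else
    let lenH : Int := heights.length
    let result : Int := 0
    let result := if PySem.List.pyGetD heights 0 0 > PySem.List.pyGetD heights 1 0 then result + 1 else result
    let result := if PySem.List.pyGetD heights (lenH - 1) 0 > PySem.List.pyGetD heights (lenH - 2) 0 then result + 1 else result
    (PySem.List.pyRange 1 ((heights.length : Int) - 1) 1).foldl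
      (fun result i =>
        if PySem.List.pyGetD heights i 0 > PySem.List.pyGetD heights (i - 1) 0 ∧
           PySem.List.pyGetD heights i 0 > PySem.List.pyGetD heights (i + 1) 0
        then result + 1 else result) result

-- ===== PORT B =====
def solve_alt (heights : List Int) : Int :=
  if heights.length ≤ 1 then 0
  else
    match heights with
    | [] => 0   -- unreachable: length ≥ 2 here
    | p :: rest =>
      let s := rest.foldl
        (fun (s : Int × Bool × Int) x =>
          ((if s.2.1 ∧ x < s.2.2 then s.1 + 1 else s.1), decide (x > s.2.2), x))
        (0, true, p)
      if s.2.1 then s.1 + 1 else s.1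

-- ===== PRECONDITION & SPEC =====
def Spec_solve (heights : List Int) (out : Int) : Prop := out = solve_alt heights
instance (heights : List Int) (out : Int) : Decidable (Spec_solve heights out) := by unfold Spec_solve; infer_instance

-- ===== CLAIM (what is proved, stated in full; the proofs are below) =====
def Claim_equal_solve : Prop := ∀ (heights : List Int), Dom_solve heights → Spec_solve heights (solve heights)

-- ===== LEMMAS AND PROOFS =====

-- number of strict local maxima among consecutive triples of a list
def tripleSum : List Int → Int
  | a :: b :: c :: t => (if b > a ∧ b > c then 1 else 0) + tripleSum (b :: c :: t)
  | _ => 0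

-- recursive reading of B's state machine
def peaksFrom (prev : Int) (rising : Bool) : List Int → Int
  | [] => if rising then 1 else 0
  | x :: t => (if rising ∧ x < prev then 1 else 0) + peaksFrom x (decide (x > prev)) t

-- 1 iff the last step of prev2 :: prev :: l is a strict rise
def lastUp : Int → Int → List Int → Int
  | a, b, [] => if b > a then 1 else 0
  | _, b, c :: t => lastUp b c t

lemma fold_peaks (l : List Int) : ∀ (c prev : Int) (r : Bool),
    (let s := l.foldl
        (fun (s : Int × Bool × Int) x =>
          ((if s.2.1 ∧ x < s.2.2 then s.1 + 1 else s.1), decide (x > s.2.2), x))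
        (c, r, prev)
      if s.2.1 then s.1 + 1 else s.1) = c + peaksFrom prev r l := by
  induction l with
  | nil => intro c prev r; simp [peaksFrom]; cases r <;> simp
  | cons x t ih =>
      intro c prev r
      simp only [List.foldl_cons, peaksFrom]
      rw [ih]
      split_ifs <;> ring

lemma pyGetD_cons_of_one_le (x : Int) (h : List Int) (i d : Int) (hi : 1 ≤ i) :
    PySem.List.pyGetD (x :: h) i d = PySem.List.pyGetD h (i - 1) d := by
  have h1 : i = ((i.toNat : Nat) : Int) := by omega
  have h2 : i - 1 = (((i.toNat - 1 : Nat) : Nat) : Int) := by omega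
  rw [h2, h1, PySem.List.pyGetD_natCast, PySem.List.pyGetD_natCast]
  have h3 : i.toNat = (i.toNat - 1) + 1 := by omega
  rw [h3]
  rfl

lemma interior_shift (x : Int) (h : List Int) :
    ∀ (lo hi init : Int), 2 ≤ lo →
    (PySem.List.pyRange lo hi 1).foldl
      (fun r i => if PySem.List.pyGetD (x :: h) i 0 > PySem.List.pyGetD (x :: h) (i - 1) 0 ∧
           PySem.List.pyGetD (x :: h) i 0 > PySem.List.pyGetD (x :: h) (i + 1) 0
        then r + 1 else r) init
    = (PySem.List.pyRange (lo - 1) (hi - 1) 1).foldl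
      (fun r i => if PySem.List.pyGetD h i 0 > PySem.List.pyGetD h (i - 1) 0 ∧
           PySem.List.pyGetD h i 0 > PySem.List.pyGetD h (i + 1) 0
        then r + 1 else r) init := by
  intro lo hi init hlo
  generalize hn : (hi - lo).toNat = n
  induction n generalizing lo init with
  | zero =>
      rw [PySem.List.pyRange_one_eq_nil (by omega), PySem.List.pyRange_one_eq_nil (by omega)]
      simp
  | succ n ih =>
      rw [PySem.List.pyRange_one_cons (by omega : lo < hi),
          PySem.List.pyRange_one_cons (by omega : lo - 1 < hi - 1)]
      simp only [List.foldl_cons]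
      rw [pyGetD_cons_of_one_le x h lo 0 (by omega),
          pyGetD_cons_of_one_le x h (lo - 1) 0 (by omega),
          pyGetD_cons_of_one_le x h (lo + 1) 0 (by omega)]
      have e1 : lo - 1 + 1 = lo + 1 - 1 := by ring
      rw [e1]
      exact ih (lo + 1) _ (by omega) (by omega)

lemma interior_eq_tripleSum (t : List Int) :
    ∀ (a b init : Int),
    (PySem.List.pyRange 1 (((a :: b :: t).length : Int) - 1) 1).foldl
      (fun r i => if PySem.List.pyGetD (a :: b :: t) i 0 > PySem.List.pyGetD (a :: b :: t) (i - 1) 0 ∧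
           PySem.List.pyGetD (a :: b :: t) i 0 > PySem.List.pyGetD (a :: b :: t) (i + 1) 0
        then r + 1 else r) init
    = init + tripleSum (a :: b :: t) := by
  induction t with
  | nil =>
      intro a b init
      rw [PySem.List.pyRange_one_eq_nil (by norm_num)]
      simp only [List.foldl_nil, tripleSum]
      ring
  | cons c t' ih =>
      intro a b init
      rw [PySem.List.pyRange_one_cons (by simp only [List.length_cons]; push_cast; omega)]
      simp only [List.foldl_cons]
      have g0 : PySem.List.pyGetD (a :: b :: c :: t') (1 - 1) 0 = a := by norm_num [PySem.List.pyGetD_zero_cons]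
      have g1 : PySem.List.pyGetD (a :: b :: c :: t') 1 0 = b := by
        rw [pyGetD_cons_of_one_le a _ 1 0 (by omega)]; norm_num [PySem.List.pyGetD_zero_cons]
      have g2 : PySem.List.pyGetD (a :: b :: c :: t') (1 + 1) 0 = c := by
        rw [pyGetD_cons_of_one_le a _ (1 + 1) 0 (by omega)]
        rw [pyGetD_cons_of_one_le b _ (1 + 1 - 1) 0 (by omega)]
        norm_num [PySem.List.pyGetD_zero_cons]
      rw [g0, g1, g2]
      have hshift := interior_shift a (b :: c :: t') (1 + 1)
        (((a :: b :: c :: t').length : Int) - 1)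
        (if b > a ∧ b > c then init + 1 else init) (by omega)
      have e3 : (1 : Int) + 1 - 1 = 1 := by ring
      have e4 : ((a :: b :: c :: t').length : Int) - 1 - 1 = ((b :: c :: t').length : Int) - 1 := by
        simp
      rw [e3, e4] at hshift
      rw [hshift, ih b c _]
      simp only [tripleSum]
      split_ifs <;> ring

lemma ep_last_cons (a : Int) (l : List Int) (hl : 2 ≤ l.length) :
    (if PySem.List.pyGetD (a :: l) (((a :: l).length : Int) - 1) 0
          > PySem.List.pyGetD (a :: l) (((a :: l).length : Int) - 2) 0 then (1 : Int) else 0)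
  = (if PySem.List.pyGetD l ((l.length : Int) - 1) 0
          > PySem.List.pyGetD l ((l.length : Int) - 2) 0 then (1 : Int) else 0) := by
  rw [pyGetD_cons_of_one_le a l (((a :: l).length : Int) - 1) 0
        (by simp only [List.length_cons]; push_cast; omega),
      pyGetD_cons_of_one_le a l (((a :: l).length : Int) - 2) 0
        (by simp only [List.length_cons]; push_cast; omega)]
  have e1 : ((a :: l).length : Int) - 1 - 1 = (l.length : Int) - 1 := by
    simp only [List.length_cons]; push_cast; ring
  have e2 : ((a :: l).length : Int) - 2 - 1 = (l.length : Int) - 2 := by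
    simp only [List.length_cons]; push_cast; ring
  rw [e1, e2]

lemma lastUp_eq (t : List Int) : ∀ (a b : Int),
    lastUp a b t
      = (if PySem.List.pyGetD (a :: b :: t) (((a :: b :: t).length : Int) - 1) 0
            > PySem.List.pyGetD (a :: b :: t) (((a :: b :: t).length : Int) - 2) 0
         then 1 else 0) := by
  induction t with
  | nil =>
      intro a b
      simp only [lastUp]
      have e1 : (([a, b] : List Int).length : Int) - 1 = 1 := by simp
      have e2 : (([a, b] : List Int).length : Int) - 2 = 0 := by simp
      rw [e1, e2, PySem.List.pyGetD_zero_cons, pyGetD_cons_of_one_le a [b] 1 0 (by omega)]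
      norm_num [PySem.List.pyGetD_zero_cons]
  | cons c t' ih =>
      intro a b
      simp only [lastUp]
      rw [ih b c, ep_last_cons a (b :: c :: t') (by simp)]

lemma peaksFrom_eq (t : List Int) : ∀ (a b : Int),
    peaksFrom b (decide (b > a)) t = tripleSum (a :: b :: t) + lastUp a b t := by
  induction t with
  | nil => intro a b; simp [peaksFrom, tripleSum, lastUp]
  | cons c t' ih =>
      intro a b
      simp only [peaksFrom, tripleSum, lastUp]
      rw [ih b c]
      have : ((decide (b > a) : Bool) = true ∧ c < b) ↔ (b > a ∧ b > c) := by
        simp [gt_iff_lt]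
      rw [if_congr this rfl rfl]
      ring

-- ===== VERDICT (by name: the statement is the Claim_ definition above) =====
theorem solve_spec : Claim_equal_solve := by
  intro heights _
  unfold Spec_solve
  match heights with
  | [] => rfl
  | [a] => rfl
  | a :: b :: t =>
    have hlen : ¬ ((a :: b :: t).length ≤ 1) := by simp
    simp only [solve, solve_alt, if_neg hlen]
    rw [fold_peaks]
    simp only [peaksFrom]
    rw [peaksFrom_eq t a b, lastUp_eq t a b]
    have g0 : PySem.List.pyGetD (a :: b :: t) 0 0 = a := PySem.List.pyGetD_zero_cons ..
    have g1 : PySem.List.pyGetD (a :: b :: t) 1 0 = b := by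
      rw [pyGetD_cons_of_one_le a (b :: t) 1 0 (by omega)]
      norm_num [PySem.List.pyGetD_zero_cons]
    rw [g0, g1, interior_eq_tripleSum t a b]
    split_ifs <;> simp_all <;> ring
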